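-- pv_equiv track=rewrite | github.com/yzeng1018/digest-hub | channels/investment/main.py | _apply_source_caps
-- ===== SOURCE A (Python) =====
-- def _apply_source_caps(articles: list[dict], caps: dict[str, int]) -> list[dict]:
--     """按来源限制文章数量，每个来源只保留分数最高的 N 篇。"""
--     counts: dict[str, int] = {}
--     result = []
--     for a in articles:  # articles 已按分数降序排列
--         source = a.get("source", "")
--         cap = caps.get(source)
--         if cap is not None:
--             counts[source] = counts.get(source, 0) + 1
--             if counts[source] > cap:
--                 continue
--         result.append(a)
--     return result
-- ===== SOURCE B (Python) =====
-- def _apply_source_caps(articles: list[dict], caps: dict[str, int]) -> list[dict]: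
--     """Staged version: group article indices per source, compute the kept-index set
--     per source (all if uncapped, else the first max(cap,0) of them), then emit."""
--     srcs = [a.get("source", "") for a in articles]
--     kept = set()
--     for s in set(srcs):
--         idxs = [i for i in range(len(srcs)) if srcs[i] == s]
--         cap = caps.get(s)
--         kept.update(idxs if cap is None else idxs[:max(cap, 0)])
--     return [a for i, a in enumerate(articles) if i in kept]
-- ===== Notes on version B (the rewrite author's own statement) =====
-- stated objective: alternative
-- what changed: Replaces A's single streaming pass with a mutable per-source counter dict by three stages: group article indices per source, compute the kept-index set per source (all indices if uncapped, else the first max(cap,0) of them), then emit the articles whose index was kept.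
import Mathlib
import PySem

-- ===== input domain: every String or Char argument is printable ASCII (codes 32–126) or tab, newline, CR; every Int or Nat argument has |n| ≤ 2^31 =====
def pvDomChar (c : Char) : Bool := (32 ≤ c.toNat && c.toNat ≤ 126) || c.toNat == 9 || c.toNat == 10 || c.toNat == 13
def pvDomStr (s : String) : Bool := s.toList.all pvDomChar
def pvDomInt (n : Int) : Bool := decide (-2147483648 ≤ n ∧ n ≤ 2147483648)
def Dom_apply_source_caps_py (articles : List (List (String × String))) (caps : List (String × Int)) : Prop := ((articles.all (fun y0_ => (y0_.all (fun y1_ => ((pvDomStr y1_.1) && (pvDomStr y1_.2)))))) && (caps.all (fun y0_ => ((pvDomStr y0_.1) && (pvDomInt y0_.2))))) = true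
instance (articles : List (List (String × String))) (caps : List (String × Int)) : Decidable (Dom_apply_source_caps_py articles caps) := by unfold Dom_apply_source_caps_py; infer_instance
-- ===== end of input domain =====

-- B replaces A's single streaming pass (mutable per-source counter dict) by staged passes:
-- group article indices per source, keep per source all of them or the first max(cap,0),
-- then emit the articles whose index was kept (alternative decomposition, not faster).

-- ===== PORT A =====
-- literal transliteration of A's loop: (counts, result) state threaded by a fold
def apply_source_caps_py (articles : List (List (String × String))) (caps : List (String × Int)) : List (List (String × String)) :=
  (articles.foldl
    (fun (st : PySem.Dict String Int × List (List (String × String))) a =>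
      let source := (PySem.Dict.mk a).getD "source" ""
      match (PySem.Dict.mk caps).get? source with
      | none => (st.1, st.2 ++ [a])
      | some cap =>
          let counts := st.1.insert source (st.1.getD source 0 + 1)
          if counts.getD source 0 > cap then (counts, st.2) else (counts, st.2 ++ [a]))
    (PySem.Dict.empty, [])).2

-- ===== PORT B =====
-- literal transliteration of Source B; 'kept' is a Python set of indices, consumed only by
-- membership tests, so set iteration order never reaches the result
def apply_source_caps_py_alt (articles : List (List (String × String))) (caps : List (String × Int)) : List (List (String × String)) :=
  let srcs := articles.map (fun a => (PySem.Dict.mk a).getD "source" "")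
  let kept := (PySem.Set.ofList srcs).foldl
    (fun (k : PySem.Set Int) s =>
      let idxs := (PySem.List.pyRange 0 (PySem.List.len srcs) 1).filter
          (fun i => PySem.List.pyGetD srcs i "" == s)
      match (PySem.Dict.mk caps).get? s with
      | none => PySem.Set.update k idxs
      | some cap => PySem.Set.update k (PySem.List.slice idxs none (some (max cap 0))))
    PySem.Set.empty
  ((PySem.List.enumerate articles).filter (fun p => PySem.Set.contains kept p.1)).map (·.2)

-- ===== PRECONDITION & SPEC =====
def Spec_apply_source_caps_py (articles : List (List (String × String))) (caps : List (String × Int)) (out : List (List (String × String))) : Prop := out = apply_source_caps_py_alt articles caps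
instance (articles : List (List (String × String))) (caps : List (String × Int)) (out : List (List (String × String))) : Decidable (Spec_apply_source_caps_py articles caps out) := by unfold Spec_apply_source_caps_py; infer_instance

-- ===== CLAIM (what is proved, stated in full; the proofs are below) =====
def Claim_equal_apply_source_caps_py : Prop := ∀ (articles : List (List (String × String))) (caps : List (String × Int)), Dom_apply_source_caps_py articles caps → Spec_apply_source_caps_py articles caps (apply_source_caps_py articles caps)

-- ===== LEMMAS AND PROOFS =====

def pvSrc (a : List (String × String)) : String := (PySem.Dict.mk a).getD "source" ""

def pvKeep (caps : List (String × Int)) (prev : List String) (s : String) : Bool :=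
  match (PySem.Dict.mk caps).get? s with
  | none => true
  | some c => decide (((prev.count s : Nat) : Int) < c)

def pvKeepList (caps : List (String × Int)) (prev : List String) :
    List (List (String × String)) → List (List (String × String))
  | [] => []
  | a :: t => (if pvKeep caps prev (pvSrc a) then [a] else []) ++ pvKeepList caps (prev ++ [pvSrc a]) t

-- A's fold computes pvKeepList (invariant: counts agrees with prefix source counts)
lemma foldA (caps : List (String × Int)) :
    ∀ (rest : List (List (String × String))) (d : PySem.Dict String Int)
      (acc : List (List (String × String))) (prev : List String),
      (∀ s, ((PySem.Dict.mk caps).get? s).isSome → d.getD s 0 = ((prev.count s : Nat) : Int)) →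
      (rest.foldl
        (fun (st : PySem.Dict String Int × List (List (String × String))) a =>
          let source := (PySem.Dict.mk a).getD "source" ""
          match (PySem.Dict.mk caps).get? source with
          | none => (st.1, st.2 ++ [a])
          | some cap =>
              let counts := st.1.insert source (st.1.getD source 0 + 1)
              if counts.getD source 0 > cap then (counts, st.2) else (counts, st.2 ++ [a]))
        (d, acc)).2 = acc ++ pvKeepList caps prev rest := by
  intro rest
  induction rest with
  | nil => intro d acc prev _; simp [pvKeepList]
  | cons a t ih =>
    intro d acc prev hinv
    rcases h : (PySem.Dict.mk caps).get? ((PySem.Dict.mk a).getD "source" "") with _ | c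
    · have hinv' : ∀ s, ((PySem.Dict.mk caps).get? s).isSome →
          d.getD s 0 = (((prev ++ [pvSrc a]).count s : Nat) : Int) := by
        intro s hs
        have hne : (pvSrc a) ≠ s := by
          intro heq
          rw [show s = pvSrc a from heq.symm] at hs
          simp only [pvSrc] at hs
          rw [h] at hs; simp at hs
        simp [List.count_append, hne, hinv s hs]
      have hstep := ih d (acc ++ [a]) (prev ++ [pvSrc a]) hinv'
      simp only [List.foldl, pvKeepList, pvKeep, pvSrc, h] at hstep ⊢
      rw [hstep]
      simp
    · have hsome : ((PySem.Dict.mk caps).get? ((PySem.Dict.mk a).getD "source" "")).isSome := by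
        rw [h]; simp
      have hcnt : (d.insert ((PySem.Dict.mk a).getD "source" "")
            (d.getD ((PySem.Dict.mk a).getD "source" "") 0 + 1)).getD
            ((PySem.Dict.mk a).getD "source" "") 0
          = ((prev.count ((PySem.Dict.mk a).getD "source" "") : Nat) : Int) + 1 := by
        rw [PySem.Dict.getD_insert_self, hinv _ hsome]
      have hinv' : ∀ s, ((PySem.Dict.mk caps).get? s).isSome →
          (d.insert ((PySem.Dict.mk a).getD "source" "")
            (d.getD ((PySem.Dict.mk a).getD "source" "") 0 + 1)).getD s 0
            = (((prev ++ [pvSrc a]).count s : Nat) : Int) := by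
        intro s hs
        rw [PySem.Dict.getD_insert]
        by_cases hes : s = (PySem.Dict.mk a).getD "source" ""
        · subst hes
          simp [List.count_append, pvSrc, hinv _ hs]
        · have hne : (pvSrc a) ≠ s := fun he => hes (by simpa [pvSrc] using he.symm)
          simp [hes, List.count_append, hne, hinv s hs]
      by_cases hc : ((prev.count ((PySem.Dict.mk a).getD "source" "") : Nat) : Int) < c
      · have hstep := ih _ (acc ++ [a]) (prev ++ [pvSrc a]) hinv'
        simp only [List.foldl, pvKeepList, pvKeep, pvSrc, h] at hstep ⊢
        rw [if_neg (by rw [hcnt]; omega), hstep]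
        simp [hc]
      · have hstep := ih _ acc (prev ++ [pvSrc a]) hinv'
        simp only [List.foldl, pvKeepList, pvKeep, pvSrc, h] at hstep ⊢
        rw [if_pos (by rw [hcnt]; omega), hstep]
        simp [hc]

-- the index list B builds for a source, over Nat
def pvIdxN (srcs : List String) (s : String) : List Nat :=
  (List.range srcs.length).filter (fun j => srcs.getD j "" == s)

-- what one iteration of B's grouping loop contributes for a source
def pvContrib (caps : List (String × Int)) (srcs : List String) (s : String) : List Int :=
  let idxs := (PySem.List.pyRange 0 (PySem.List.len srcs) 1).filter
      (fun i => PySem.List.pyGetD srcs i "" == s)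
  match (PySem.Dict.mk caps).get? s with
  | none => idxs
  | some cap => PySem.List.slice idxs none (some (max cap 0))

lemma idxs_eq_map (srcs : List String) (s : String) :
    (PySem.List.pyRange 0 (PySem.List.len srcs) 1).filter
        (fun i => PySem.List.pyGetD srcs i "" == s)
      = (pvIdxN srcs s).map (Nat.cast : Nat → Int) := by
  rw [PySem.List.len_eq, PySem.List.pyRange_zero_natCast, List.filter_map]
  unfold pvIdxN
  have h : List.filter ((fun i => PySem.List.pyGetD srcs i "" == s) ∘ fun (k : Nat) => (k : Int))
        (List.range srcs.length)
      = (List.range srcs.length).filter (fun j => srcs.getD j "" == s) := by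
    apply List.filter_congr
    intro j hj
    simp [Function.comp]
  rw [h]

lemma mem_take_filter_range (p : Nat → Bool) (i k : Nat) :
    ∀ n : Nat, i ∈ ((List.range n).filter p).take k ↔
      i < n ∧ p i = true ∧ ((List.range i).filter p).length < k := by
  intro n
  induction n with
  | zero => simp
  | succ n ih =>
    rw [List.range_succ, List.filter_append, List.take_append, List.mem_append]
    rcases Nat.lt_trichotomy i n with hlt | heq | hgt
    · constructor
      · rintro (h | h)
        · exact ⟨Nat.lt_succ_of_lt hlt, (ih.mp h).2⟩
        · exfalso
          have : i ∈ [n].filter p := List.mem_of_mem_take h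
          have : i = n := by simpa using (List.mem_filter.mp this).1
          omega
      · rintro ⟨_, hp, hl⟩
        exact Or.inl (ih.mpr ⟨hlt, hp, hl⟩)
    · subst heq
      have hnotF : ∀ k', i ∉ (((List.range i).filter p).take k') := by
        intro k' hmem
        have := List.mem_range.mp (List.mem_filter.mp (List.mem_of_mem_take hmem)).1
        omega
      constructor
      · rintro (h | h)
        · exact absurd h (hnotF k)
        · rcases List.mem_filter.mp (List.mem_of_mem_take h) with ⟨_, hp⟩
          refine ⟨Nat.lt_succ_self i, hp, ?_⟩
          by_contra hk
          rw [Nat.not_lt] at hk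
          rw [List.take_eq_nil_iff.mpr] at h
          · simp at h
          · left; omega
      · rintro ⟨_, hp, hl⟩
        right
        have : [i].filter p = [i] := by simp [hp]
        rw [this]
        have : (0 : Nat) < k - ((List.range i).filter p).length := by omega
        rcases Nat.exists_eq_add_of_lt this with ⟨m, hm⟩
        rw [show k - ((List.range i).filter p).length = 0 + m + 1 from hm]
        simp
    · constructor
      · rintro (h | h)
        · have := List.mem_range.mp (List.mem_filter.mp (List.mem_of_mem_take h)).1
          omega
        · have : i = n := by simpa using (List.mem_filter.mp (List.mem_of_mem_take h)).1
          omega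
      · rintro ⟨h, _, _⟩; omega

lemma count_take_eq (srcs : List String) (s : String) (i : Nat) (hi : i ≤ srcs.length) :
    ((List.range i).filter (fun j => srcs.getD j "" == s)).length = (srcs.take i).count s := by
  have htake : srcs.take i = (List.range i).map (fun j => srcs.getD j "") := by
    apply List.ext_getElem
    · simp; omega
    · intro j h1 h2
      have hj : j < i := by simpa using h2
      have hj' : j < srcs.length := by omega
      simp [List.getElem_take, List.getD_eq_getElem?_getD, List.getElem?_eq_getElem hj']
  rw [htake, List.count_eq_countP, List.countP_map, ← List.countP_eq_length_filter]
  rfl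

-- membership in B's kept set for an in-range index
lemma mem_contrib_iff (caps : List (String × Int)) (srcs : List String) (s : String)
    (i : Nat) (hi : i < srcs.length) :
    ((i : Int) ∈ pvContrib caps srcs s) ↔
      (srcs.getD i "" = s ∧ pvKeep caps (srcs.take i) s = true) := by
  unfold pvContrib
  simp only [idxs_eq_map]
  cases h : (PySem.Dict.mk caps).get? s with
  | none =>
    simp only [pvKeep, h, List.mem_map, and_true]
    constructor
    · rintro ⟨j, hj, hcast⟩
      have hji : j = i := by exact_mod_cast hcast
      subst hji
      have hp := (List.mem_filter.mp hj).2
      rw [beq_iff_eq] at hp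
      exact hp
    · intro hs
      exact ⟨i, List.mem_filter.mpr ⟨List.mem_range.mpr hi, beq_iff_eq.mpr hs⟩, rfl⟩
  | some c =>
    have hslice : PySem.List.slice ((pvIdxN srcs s).map (Nat.cast : Nat → Int)) none (some (max c 0))
        = ((pvIdxN srcs s).take (max c 0).toNat).map (Nat.cast : Nat → Int) := by
      rw [PySem.List.slice_to _ (le_max_right c 0), List.map_take]
    simp only [pvKeep, h, hslice, List.mem_map]
    constructor
    · rintro ⟨j, hj, hcast⟩
      have hji : j = i := by exact_mod_cast hcast
      subst hji
      rcases (mem_take_filter_range _ j _ _).mp hj with ⟨_, hp, hl⟩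
      rw [count_take_eq srcs s j (le_of_lt hi)] at hl
      rw [beq_iff_eq] at hp
      refine ⟨hp, ?_⟩
      simp only [decide_eq_true_eq]
      omega
    · rintro ⟨hs, hk⟩
      simp only [decide_eq_true_eq] at hk
      refine ⟨i, (mem_take_filter_range _ i _ _).mpr ⟨hi, beq_iff_eq.mpr hs, ?_⟩, rfl⟩
      rw [count_take_eq srcs s i (le_of_lt hi)]
      omega

-- B's kept set, named for the proofs (defeq to the fold in apply_source_caps_py_alt)
def pvKept (caps : List (String × Int)) (srcs : List String) : PySem.Set Int :=
  (PySem.Set.ofList srcs).foldl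
    (fun (k : PySem.Set Int) s =>
      let idxs := (PySem.List.pyRange 0 (PySem.List.len srcs) 1).filter
          (fun i => PySem.List.pyGetD srcs i "" == s)
      match (PySem.Dict.mk caps).get? s with
      | none => PySem.Set.update k idxs
      | some cap => PySem.Set.update k (PySem.List.slice idxs none (some (max cap 0))))
    PySem.Set.empty

lemma mem_foldl_update (g : String → List Int) :
    ∀ (l : List String) (k0 : PySem.Set Int) (x : Int),
      x ∈ l.foldl (fun k s => PySem.Set.update k (g s)) k0 ↔ x ∈ k0 ∨ ∃ s ∈ l, x ∈ g s := by
  intro l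
  induction l with
  | nil => simp
  | cons a t ih =>
    intro k0 x
    simp only [List.foldl_cons]
    rw [ih, PySem.Set.mem_update]
    simp only [List.mem_cons]
    constructor
    · rintro ((h | h) | ⟨s, hs, h⟩)
      · exact Or.inl h
      · exact Or.inr ⟨a, Or.inl rfl, h⟩
      · exact Or.inr ⟨s, Or.inr hs, h⟩
    · rintro (h | ⟨s, rfl | hs, h⟩)
      · exact Or.inl (Or.inl h)
      · exact Or.inl (Or.inr h)
      · exact Or.inr ⟨s, hs, h⟩

lemma mem_kept_iff (caps : List (String × Int)) (srcs : List String) (i : Nat) (hi : i < srcs.length) :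
    ((i : Int) ∈ pvKept caps srcs) ↔
      pvKeep caps (srcs.take i) (srcs.getD i "") = true := by
  unfold pvKept
  have hbody : (fun (k : PySem.Set Int) s =>
        let idxs := (PySem.List.pyRange 0 (PySem.List.len srcs) 1).filter
            (fun i => PySem.List.pyGetD srcs i "" == s)
        match (PySem.Dict.mk caps).get? s with
        | none => PySem.Set.update k idxs
        | some cap => PySem.Set.update k (PySem.List.slice idxs none (some (max cap 0))))
      = fun (k : PySem.Set Int) s => PySem.Set.update k (pvContrib caps srcs s) := by
    funext k s
    unfold pvContrib
    cases (PySem.Dict.mk caps).get? s <;> rfl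
  rw [hbody, mem_foldl_update]
  constructor
  · rintro (h | ⟨s, hs, hmem⟩)
    · simp [PySem.Set.empty] at h
    · rcases (mem_contrib_iff caps srcs s i hi).mp hmem with ⟨heq, hk⟩
      rwa [heq]
  · intro hk
    right
    refine ⟨srcs.getD i "", ?_, (mem_contrib_iff caps srcs _ i hi).mpr ⟨rfl, hk⟩⟩
    rw [PySem.Set.mem_ofList]
    have hgd : srcs.getD i "" = srcs[i] := by
      simp [List.getD_eq_getElem?_getD, List.getElem?_eq_getElem hi]
    rw [hgd]
    exact List.getElem_mem hi

-- B's emit pass computes pvKeepList, given any membership test matching pvKeep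
lemma emitGen (caps : List (String × Int)) (srcs : List String) (f : Int → Bool)
    (hf : ∀ i : Nat, i < srcs.length →
      f (i : Int) = pvKeep caps (srcs.take i) (srcs.getD i "")) :
    ∀ (xs : List (List (String × String))) (n : Nat),
      srcs.drop n = xs.map pvSrc →
      ((PySem.List.enumerate xs ((n : Nat) : Int)).filter (fun p => f p.1)).map (·.2)
        = pvKeepList caps (srcs.take n) xs := by
  intro xs
  induction xs with
  | nil => intro n _; simp [pvKeepList, PySem.List.enumerate_nil]
  | cons a t ih =>
    intro n hdrop
    have hget : srcs[n]? = some (pvSrc a) := by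
      have h0 : (srcs.drop n)[0]? = some (pvSrc a) := by rw [hdrop]; simp
      simpa using h0
    have hn : n < srcs.length := by
      by_contra h
      rw [List.getElem?_eq_none (by omega)] at hget
      cases hget
    have hgd : srcs.getD n "" = pvSrc a := by
      simp [List.getD_eq_getElem?_getD, hget]
    have htake : srcs.take (n + 1) = srcs.take n ++ [pvSrc a] := by
      rw [List.take_add_one, hget]
      rfl
    have hdrop' : srcs.drop (n + 1) = t.map pvSrc := by
      have h1 : srcs.drop (n + 1) = (srcs.drop n).drop 1 := by
        rw [List.drop_drop, Nat.add_comm]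
      rw [h1, hdrop]
      simp
    have hcond := hf n hn
    rw [hgd] at hcond
    have hcast : ((n : Nat) : Int) + 1 = (((n + 1 : Nat)) : Int) := by push_cast; ring
    rw [PySem.List.enumerate_cons, List.filter_cons]
    rcases hkeep : pvKeep caps (srcs.take n) (pvSrc a) with _ | _
    · rw [hkeep] at hcond
      rw [if_neg (by simpa using hcond)]
      rw [hcast, ih (n + 1) hdrop']
      simp only [pvKeepList, hkeep, htake]
      simp
    · rw [hkeep] at hcond
      rw [if_pos (by simpa using hcond)]
      simp only [List.map_cons]
      rw [hcast, ih (n + 1) hdrop']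
      simp only [pvKeepList, hkeep, htake]
      simp

-- ===== VERDICT (by name: the statement is the Claim_ definition above) =====
theorem apply_source_caps_py_spec : Claim_equal_apply_source_caps_py := by
  intro articles caps _
  unfold Spec_apply_source_caps_py apply_source_caps_py apply_source_caps_py_alt
  rw [foldA caps articles PySem.Dict.empty [] []
    (by intro s _; simp [PySem.Dict.getD_empty])]
  show pvKeepList caps [] articles =
    ((PySem.List.enumerate articles).filter (fun p =>
      PySem.Set.contains (pvKept caps (articles.map (fun a => (PySem.Dict.mk a).getD "source" ""))) p.1)).map (·.2)
  have hf : ∀ i : Nat, i < (articles.map (fun a => (PySem.Dict.mk a).getD "source" "")).length →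
      (fun j => PySem.Set.contains (pvKept caps (articles.map (fun a => (PySem.Dict.mk a).getD "source" ""))) j) ((i : Nat) : Int)
        = pvKeep caps ((articles.map (fun a => (PySem.Dict.mk a).getD "source" "")).take i)
            ((articles.map (fun a => (PySem.Dict.mk a).getD "source" "")).getD i "") := by
    intro i hi
    rw [Bool.eq_iff_iff, PySem.Set.contains_iff]
    exact (mem_kept_iff caps _ i hi).trans (by simp)
  have hB := emitGen caps (articles.map (fun a => (PySem.Dict.mk a).getD "source" ""))
    (fun j => PySem.Set.contains (pvKept caps (articles.map (fun a => (PySem.Dict.mk a).getD "source" ""))) j)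
    hf articles 0 (by simp [pvSrc])
  simpa only [Nat.cast_zero, List.take_zero] using hB.symm
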